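-- pv_equiv track=rewrite | github.com/RachitSingh-Creator/Pdf-extractor | backend/main.py | _infer_header_merges_from_rows
-- ===== SOURCE A (Python) =====
-- def _infer_header_merges_from_rows(rows, header_row_count):
--     merges = []
--     for row_idx in range(min(header_row_count, len(rows))):
--         row = rows[row_idx]
--         col_idx = 0
--         while col_idx < len(row):
--             value = row[col_idx].strip()
--             if not value:
--                 col_idx += 1
--                 continue
--
--             end_idx = col_idx
--             while end_idx + 1 < len(row) and not row[end_idx + 1].strip():
--                 end_idx += 1
--
--             if end_idx > col_idx:
--                 merges.append({
--                     "row": row_idx,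
--                     "start_col": col_idx,
--                     "end_col": end_idx,
--                 })
--             col_idx = end_idx + 1
--
--     return merges
-- ===== SOURCE B (Python) =====
-- def _infer_header_merges_from_rows(rows, header_row_count):
--     merges = []
--     for row_idx in range(min(header_row_count, len(rows))):
--         row = rows[row_idx]
--         positions = [i for i, cell in enumerate(row) if cell.strip()]
--         for j, p in enumerate(positions):
--             end = positions[j + 1] - 1 if j + 1 < len(positions) else len(row) - 1
--             if end > p:
--                 merges.append({"row": row_idx, "start_col": p, "end_col": end})
--     return merges
-- ===== Notes on version B (the rewrite author's own statement) =====
-- stated objective: alternative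
-- what changed: Per row, B first collects the indices of non-empty (after strip) cells and derives each merge from the gap to the next collected index (or end of row), replacing A's inline two-pointer sweep with its inner while over trailing empties.
import Mathlib
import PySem

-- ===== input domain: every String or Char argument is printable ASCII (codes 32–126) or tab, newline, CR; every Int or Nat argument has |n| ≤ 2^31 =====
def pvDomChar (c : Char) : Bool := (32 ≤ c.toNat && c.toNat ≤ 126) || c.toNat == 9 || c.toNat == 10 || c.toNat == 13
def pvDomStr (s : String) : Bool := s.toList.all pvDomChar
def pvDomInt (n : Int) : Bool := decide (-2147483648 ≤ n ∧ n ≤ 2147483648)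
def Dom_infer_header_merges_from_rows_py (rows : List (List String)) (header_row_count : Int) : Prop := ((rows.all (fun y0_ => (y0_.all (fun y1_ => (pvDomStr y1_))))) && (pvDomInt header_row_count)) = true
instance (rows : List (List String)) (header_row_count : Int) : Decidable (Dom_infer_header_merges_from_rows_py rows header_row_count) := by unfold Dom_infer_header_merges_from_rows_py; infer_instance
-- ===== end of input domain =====

-- B replaces A's in-row two-pointer sweep (inner while over trailing empties) by first
-- collecting the indices of non-empty cells and deriving each merge from the gap to the
-- next collected index; objective: alternative decomposition, same cost. Same output.

-- ===== PORT A =====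
-- 'value = row[c].strip(); if not value' — empty after strip
def pvEmpty (s : String) : Bool := PySem.Str.strip s == ""

-- the merge dict literal, shared record shape of both ports
def pvMerge (r s e : Int) : List (String × Int) :=
  [("row", r), ("start_col", s), ("end_col", e)]

-- the inner 'while end_idx + 1 < len(row) and not row[end_idx+1].strip()': number of leading empty cells
def pvCountEmpties : List String → Nat
  | [] => 0
  | x :: xs => if pvEmpty x then pvCountEmpties xs + 1 else 0

-- the outer 'while col_idx < len(row)' sweep, walking the suffix of the row at col_idx
def pvAScan (rowIdx : Int) (colIdx : Int) : List String → List (List (String × Int))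
  | [] => []
  | c :: tail =>
    if pvEmpty c then pvAScan rowIdx (colIdx + 1) tail
    else
      let k := pvCountEmpties tail
      let endIdx := colIdx + (k : Int)
      (if endIdx > colIdx then [pvMerge rowIdx colIdx endIdx] else []) ++
        pvAScan rowIdx (endIdx + 1) (tail.drop k)
  termination_by rest => rest.length
  decreasing_by
    all_goals simp [List.length_drop]

def infer_header_merges_from_rows_py (rows : List (List String)) (header_row_count : Int) : List (List (String × Int)) :=
  (PySem.List.pyRange 0 (min header_row_count (rows.length : Int)) 1).foldl
    (fun merges i => merges ++ pvAScan i 0 ((PySem.List.pyGet? rows i).getD [])) []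

-- ===== PORT B =====
-- 'positions = [i for i, cell in enumerate(row) if cell.strip()]'
def pvPositions (i : Int) : List String → List Int
  | [] => []
  | c :: tail => if pvEmpty c then pvPositions (i + 1) tail else i :: pvPositions (i + 1) tail

-- 'for j, p in enumerate(positions): end = positions[j+1]-1 if j+1 < len(positions) else len(row)-1'
def pvPairs (rowIdx rowLen : Int) : List Int → List (List (String × Int))
  | [] => []
  | [p] => if rowLen - 1 > p then [pvMerge rowIdx p (rowLen - 1)] else []
  | p :: q :: rest =>
      (if q - 1 > p then [pvMerge rowIdx p (q - 1)] else []) ++ pvPairs rowIdx rowLen (q :: rest)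

def infer_header_merges_from_rows_py_alt (rows : List (List String)) (header_row_count : Int) : List (List (String × Int)) :=
  (PySem.List.pyRange 0 (min header_row_count (rows.length : Int)) 1).foldl
    (fun merges i =>
      let row := (PySem.List.pyGet? rows i).getD []
      merges ++ pvPairs i (row.length : Int) (pvPositions 0 row)) []

-- ===== PRECONDITION & SPEC =====
def Spec_infer_header_merges_from_rows_py (rows : List (List String)) (header_row_count : Int) (out : List (List (String × Int))) : Prop := out = infer_header_merges_from_rows_py_alt rows header_row_count
instance (rows : List (List String)) (header_row_count : Int) (out : List (List (String × Int))) : Decidable (Spec_infer_header_merges_from_rows_py rows header_row_count out) := by unfold Spec_infer_header_merges_from_rows_py; infer_instance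

-- ===== CLAIM (what is proved, stated in full; the proofs are below) =====
def Claim_equal_infer_header_merges_from_rows_py : Prop := ∀ (rows : List (List String)) (header_row_count : Int), Dom_infer_header_merges_from_rows_py rows header_row_count → Spec_infer_header_merges_from_rows_py rows header_row_count (infer_header_merges_from_rows_py rows header_row_count)

-- ===== LEMMAS AND PROOFS =====
theorem pvCountEmpties_le (l : List String) : pvCountEmpties l ≤ l.length := by
  induction l with
  | nil => simp [pvCountEmpties]
  | cons x xs ih =>
    by_cases h : pvEmpty x
    · simp [pvCountEmpties, h]; omega
    · simp [pvCountEmpties, h]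

theorem pvPositions_drop (l : List String) : ∀ c : Int,
    pvPositions c l = pvPositions (c + (pvCountEmpties l : Int)) (l.drop (pvCountEmpties l)) := by
  induction l with
  | nil => intro c; simp [pvCountEmpties]
  | cons x xs ih =>
    intro c
    by_cases h : pvEmpty x
    · have : pvCountEmpties (x :: xs) = pvCountEmpties xs + 1 := by simp [pvCountEmpties, h]
      rw [this]
      have hdrop : (x :: xs).drop (pvCountEmpties xs + 1) = xs.drop (pvCountEmpties xs) := rfl
      rw [hdrop]
      have := ih (c + 1)
      rw [show pvPositions c (x :: xs) = pvPositions (c + 1) xs by simp [pvPositions, h]]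
      rw [this]; congr 1; push_cast; ring
    · have : pvCountEmpties (x :: xs) = 0 := by simp [pvCountEmpties, h]
      rw [this]; simp

theorem pvDrop_head_nonempty (l : List String) : ∀ d rest,
    l.drop (pvCountEmpties l) = d :: rest → pvEmpty d = false := by
  induction l with
  | nil => intro d rest h; simp [pvCountEmpties] at h
  | cons x xs ih =>
    intro d rest h
    by_cases hx : pvEmpty x
    · rw [show pvCountEmpties (x :: xs) = pvCountEmpties xs + 1 by simp [pvCountEmpties, hx]] at h
      exact ih d rest h
    · rw [show pvCountEmpties (x :: xs) = 0 by simp [pvCountEmpties, hx]] at h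
      simp at h
      rcases h with ⟨rfl, rfl⟩
      simpa using hx

theorem pvScan_eq : ∀ (n : Nat) (row : List String), row.length ≤ n → ∀ (r c : Int),
    pvAScan r c row = pvPairs r (c + (row.length : Int)) (pvPositions c row) := by
  intro n
  induction n with
  | zero =>
    intro row hlen r c
    have : row = [] := List.eq_nil_of_length_eq_zero (Nat.le_zero.mp hlen)
    subst this; simp [pvAScan, pvPositions, pvPairs]
  | succ n ih =>
    intro row hlen r c
    cases row with
    | nil => simp [pvAScan, pvPositions, pvPairs]
    | cons x tail =>
      by_cases hx : pvEmpty x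
      · rw [show pvAScan r c (x :: tail) = pvAScan r (c + 1) tail by rw [pvAScan]; simp [hx]]
        rw [show pvPositions c (x :: tail) = pvPositions (c + 1) tail by simp [pvPositions, hx]]
        rw [ih tail (by simpa using Nat.le_of_succ_le_succ hlen) r (c + 1)]
        congr 1
        simp; ring
      · have hkle : pvCountEmpties tail ≤ tail.length := pvCountEmpties_le tail
        rw [show pvAScan r c (x :: tail)
              = (if c + (pvCountEmpties tail : Int) > c
                 then [pvMerge r c (c + (pvCountEmpties tail : Int))] else []) ++
                  pvAScan r (c + (pvCountEmpties tail : Int) + 1) (tail.drop (pvCountEmpties tail)) by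
              rw [pvAScan]; simp [hx]]
        rw [show pvPositions c (x :: tail) = c :: pvPositions (c + 1) tail by simp [pvPositions, hx]]
        have hpd := pvPositions_drop tail (c + 1)
        cases hdrop : tail.drop (pvCountEmpties tail) with
        | nil =>
          have hkl : pvCountEmpties tail = tail.length := by
            have := congrArg List.length hdrop; simp at this; omega
          rw [hdrop] at hpd
          rw [hpd]
          rw [show pvPositions (c + 1 + (pvCountEmpties tail : Int)) ([] : List String) = [] from rfl]
          rw [show pvAScan r (c + (pvCountEmpties tail : Int) + 1) ([] : List String) = [] from by rw [pvAScan]]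
          simp only [List.append_nil]
          rw [show pvPairs r (c + ((x :: tail).length : Int)) [c]
                = if c + ((x :: tail).length : Int) - 1 > c
                  then [pvMerge r c (c + ((x :: tail).length : Int) - 1)] else [] from rfl]
          have hlen' : ((x :: tail).length : Int) = (tail.length : Int) + 1 := by simp
          split_ifs with h1 h2 h2
          all_goals try rfl
          all_goals try (exfalso; omega)
          all_goals congr 2
          all_goals omega
        | cons d rest =>
          have hd : pvEmpty d = false := pvDrop_head_nonempty tail d rest hdrop
          have hlendrop : rest.length + 1 = tail.length - pvCountEmpties tail := by
            have := congrArg List.length hdrop; simp at this; omega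
          rw [hdrop] at hpd
          rw [hpd]
          rw [show c + 1 + (pvCountEmpties tail : Int) = c + (pvCountEmpties tail : Int) + 1 from by ring]
          rw [show pvPositions (c + (pvCountEmpties tail : Int) + 1) (d :: rest)
                = (c + (pvCountEmpties tail : Int) + 1)
                    :: pvPositions (c + (pvCountEmpties tail : Int) + 1 + 1) rest by
              simp [pvPositions, hd]]
          have hIH := ih (d :: rest) (by simp at hlen ⊢; omega) r (c + (pvCountEmpties tail : Int) + 1)
          rw [hIH]
          rw [show pvPositions (c + (pvCountEmpties tail : Int) + 1) (d :: rest)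
                = (c + (pvCountEmpties tail : Int) + 1)
                    :: pvPositions (c + (pvCountEmpties tail : Int) + 1 + 1) rest by
              simp [pvPositions, hd]]
          rw [show pvPairs r (c + ((x :: tail).length : Int))
                (c :: (c + (pvCountEmpties tail : Int) + 1)
                    :: pvPositions (c + (pvCountEmpties tail : Int) + 1 + 1) rest)
              = (if (c + (pvCountEmpties tail : Int) + 1) - 1 > c
                 then [pvMerge r c ((c + (pvCountEmpties tail : Int) + 1) - 1)] else []) ++
                pvPairs r (c + ((x :: tail).length : Int))
                  ((c + (pvCountEmpties tail : Int) + 1)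
                    :: pvPositions (c + (pvCountEmpties tail : Int) + 1 + 1) rest) from rfl]
          have e2 : c + ((x :: tail).length : Int)
              = c + (pvCountEmpties tail : Int) + 1 + ((d :: rest).length : Int) := by
            simp; omega
          rw [e2, show (c + (pvCountEmpties tail : Int) + 1) - 1 = c + (pvCountEmpties tail : Int) from by ring]

-- ===== VERDICT (by name: the statement is the Claim_ definition above) =====
theorem infer_header_merges_from_rows_py_spec : Claim_equal_infer_header_merges_from_rows_py := by
  intro rows h _
  unfold Spec_infer_header_merges_from_rows_py
  unfold infer_header_merges_from_rows_py infer_header_merges_from_rows_py_alt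
  apply PySem.List.foldl_congr_mem
  intro acc i _
  congr 1
  have := pvScan_eq ((PySem.List.pyGet? rows i).getD []).length _ (le_refl _) i 0
  rw [this]; congr 1; ring
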